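-- pv_equiv track=rewrite | github.com/AlexeyKhfzv/TextGenerator | code/generator2.py | remove_extra_chars
-- ===== SOURCE A (Python) =====
-- def remove_extra_chars(text_data: str, extra_chars) -> str:
--     if extra_chars:
--         for char in extra_chars: text_data = text_data.replace(char, '')
--
--     text_data = text_data.replace("\n", " ")
--     result = ""
--     prev_whitespace = False
--     for char in text_data:
--         if char == ' ':
--             if prev_whitespace: continue
--             else: prev_whitespace = True
--         else: prev_whitespace = False
--
--         result += char
--
--     return result
-- ===== SOURCE B (Python) =====
-- def remove_extra_chars(text_data: str, extra_chars) -> str: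
--     if extra_chars:
--         for char in extra_chars:
--             text_data = text_data.replace(char, '')
--     text_data = text_data.replace("\n", " ")
--     while "  " in text_data:
--         text_data = text_data.replace("  ", " ")
--     return text_data
-- ===== Notes on version B (the rewrite author's own statement) =====
-- stated objective: simpler
-- what changed: A's character-by-character collapse loop with a result accumulator and a prev_whitespace flag is replaced by iterating the global rewrite text_data.replace(' ', ' ') until no double space remains (a fixpoint of a string rewrite instead of a scanning state machine).
import Mathlib
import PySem

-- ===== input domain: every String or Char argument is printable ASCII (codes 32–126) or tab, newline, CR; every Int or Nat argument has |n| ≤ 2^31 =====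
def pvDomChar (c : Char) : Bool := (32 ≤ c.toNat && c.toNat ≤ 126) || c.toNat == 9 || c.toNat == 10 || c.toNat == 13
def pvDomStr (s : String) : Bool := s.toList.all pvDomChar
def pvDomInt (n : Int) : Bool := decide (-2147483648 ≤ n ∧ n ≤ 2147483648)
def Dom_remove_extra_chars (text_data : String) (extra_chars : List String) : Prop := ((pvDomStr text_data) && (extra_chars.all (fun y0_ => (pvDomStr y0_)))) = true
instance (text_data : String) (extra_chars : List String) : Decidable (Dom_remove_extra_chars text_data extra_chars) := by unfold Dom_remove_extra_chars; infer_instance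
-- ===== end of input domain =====

-- B replaces A's character-by-character collapse loop (accumulator + prev_whitespace flag) by a
-- fixpoint of the global rewrite "  " -> " " (simpler: two lines instead of the state machine).

-- ===== PORT A =====
def remove_extra_chars (text_data : String) (extra_chars : List String) : String :=
  let t0 := if extra_chars.isEmpty then text_data
            else extra_chars.foldl (fun td ch => PySem.Str.replace td ch "") text_data
  let t1 := PySem.Str.replace t0 "\n" " "
  let st := t1.toList.foldl
      (fun (p : List Char × Bool) c =>
        if c = ' ' then (if p.2 then p else (p.1 ++ [c], true))
        else (p.1 ++ [c], false)) ([], false)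
  String.mk st.1

-- ===== PORT B =====
-- `mrep l` is exactly one pass of `l.replace("  ", " ")` (non-overlapping, left to right);
-- it and the two lemmas below are needed for the termination of collapseFix, so they stay here.
def mrep : List Char → List Char
  | [] => []
  | [c] => [c]
  | c :: d :: r => if c = ' ' ∧ d = ' ' then ' ' :: mrep r else c :: mrep (d :: r)

theorem mrep_go_eq (fuel : Nat) : ∀ (l acc : List Char), l.length ≤ fuel →
    PySem.Chars.replace.go [' ', ' '] [' '] fuel l acc = acc.reverse ++ mrep l := by
  induction fuel with
  | zero =>
    intro l acc h
    have : l = [] := List.eq_nil_of_length_eq_zero (Nat.le_zero.mp h)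
    subst this
    simp [PySem.Chars.replace.go, mrep]
  | succ n ih =>
    intro l acc h
    match l with
    | [] => simp [PySem.Chars.replace.go, mrep]
    | [c] =>
      have hpre : [' ', ' '].isPrefixOf [c] = false := by
        simp [List.isPrefixOf]
      simp [PySem.Chars.replace.go, hpre, mrep]
      rw [ih [] (c :: acc) (by simp)]
      simp [mrep]
    | c :: d :: r =>
      by_cases hcd : c = ' ' ∧ d = ' '
      · obtain ⟨hc, hd⟩ := hcd
        subst hc; subst hd
        have hpre : [' ', ' '].isPrefixOf (' ' :: ' ' :: r) = true := by
          simp [List.isPrefixOf]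
        simp only [PySem.Chars.replace.go, hpre, if_true]
        rw [show List.drop [' ', ' '].length (' ' :: ' ' :: r) = r from rfl]
        rw [ih r ([' '].reverse ++ acc) (by simp at h ⊢; omega)]
        simp [mrep]
      · have hpre : [' ', ' '].isPrefixOf (c :: d :: r) = false := by
          apply Bool.eq_false_iff.mpr
          intro hp
          obtain ⟨h1, h2⟩ := List.cons_prefix_cons.mp (List.isPrefixOf_iff_prefix.mp hp)
          obtain ⟨h3, _⟩ := List.cons_prefix_cons.mp h2
          exact hcd ⟨h1.symm, h3.symm⟩
        simp only [PySem.Chars.replace.go, hpre, Bool.false_eq_true, if_false]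
        rw [ih (d :: r) (c :: acc) (by simp at h ⊢; omega)]
        simp [mrep, hcd]

theorem replace_dd_eq_mrep (l : List Char) :
    PySem.Chars.replace l [' ', ' '] [' '] = mrep l := by
  rw [PySem.Chars.replace]
  simp only [List.isEmpty_cons, Bool.false_eq_true, if_false]
  rw [mrep_go_eq l.length l [] (le_refl _)]
  simp

theorem mrep_length_le (l : List Char) : (mrep l).length ≤ l.length := by
  induction l using mrep.induct with
  | case1 => simp [mrep]
  | case2 c => simp [mrep]
  | case3 c d r h ih => simp [mrep, h]; omega
  | case4 c d r h ih => simp [mrep, h]; simpa using ih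

theorem mrep_length_lt (l : List Char) (h : [' ', ' '] <:+: l) :
    (mrep l).length < l.length := by
  induction l using mrep.induct with
  | case1 => exact absurd h.length_le (by simp)
  | case2 c => exact absurd h.length_le (by simp)
  | case3 c d r hcd ih =>
    have := mrep_length_le r
    simp [mrep, hcd]; omega
  | case4 c d r hcd ih =>
    have hsub : [' ', ' '] <:+: d :: r := by
      rcases List.infix_cons_iff.mp h with hp | hi
      · obtain ⟨h1, h2⟩ := List.cons_prefix_cons.mp hp
        obtain ⟨h3, _⟩ := List.cons_prefix_cons.mp h2
        exact absurd ⟨h1.symm, h3.symm⟩ hcd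
      · exact hi
    have := ih hsub
    simp only [List.length_cons] at this
    simp only [mrep, hcd, if_false, List.length_cons]
    omega

theorem replace_dd_length_lt (l : List Char) (h : PySem.Chars.isIn [' ', ' '] l = true) :
    (PySem.Chars.replace l [' ', ' '] [' ']).length < l.length := by
  rw [replace_dd_eq_mrep]
  exact mrep_length_lt l ((PySem.Chars.isIn_iff_infix _ _).mp h)

def collapseFix (l : List Char) : List Char :=
  if h : PySem.Chars.isIn [' ', ' '] l = true then
    collapseFix (PySem.Chars.replace l [' ', ' '] [' '])
  else l
termination_by l.length
decreasing_by exact replace_dd_length_lt l h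

def remove_extra_chars_alt (text_data : String) (extra_chars : List String) : String :=
  let t0 := if extra_chars.isEmpty then text_data
            else extra_chars.foldl (fun td ch => PySem.Str.replace td ch "") text_data
  let t1 := PySem.Str.replace t0 "\n" " "
  String.mk (collapseFix t1.toList)

-- ===== PRECONDITION & SPEC =====
def Spec_remove_extra_chars (text_data : String) (extra_chars : List String) (out : String) : Prop := out = remove_extra_chars_alt text_data extra_chars
instance (text_data : String) (extra_chars : List String) (out : String) : Decidable (Spec_remove_extra_chars text_data extra_chars out) := by unfold Spec_remove_extra_chars; infer_instance

-- ===== CLAIM (what is proved, stated in full; the proofs are below) =====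
def Claim_equal_remove_extra_chars : Prop := ∀ (text_data : String) (extra_chars : List String), Dom_remove_extra_chars text_data extra_chars → Spec_remove_extra_chars text_data extra_chars (remove_extra_chars text_data extra_chars)

-- ===== LEMMAS AND PROOFS =====

-- the collapsed-runs normal form both programs compute
def squeeze : List Char → List Char
  | [] => []
  | [c] => [c]
  | c :: d :: r => if c = ' ' ∧ d = ' ' then squeeze (d :: r) else c :: squeeze (d :: r)

-- A's loop as a recursion on the characters, state = prev_whitespace
def aloop : Bool → List Char → List Char
  | _, [] => []
  | p, c :: r => if c = ' ' then (if p then aloop true r else ' ' :: aloop true r)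
                 else c :: aloop false r

theorem foldl_eq_aloop (l : List Char) : ∀ (acc : List Char) (p : Bool),
    (l.foldl (fun (q : List Char × Bool) c =>
        if c = ' ' then (if q.2 then q else (q.1 ++ [c], true))
        else (q.1 ++ [c], false)) (acc, p)).1 = acc ++ aloop p l := by
  induction l with
  | nil => intro acc p; simp [aloop]
  | cons c r ih =>
    intro acc p
    by_cases hc : c = ' '
    · subst hc
      cases p
      · simp only [List.foldl_cons, if_true, Bool.false_eq_true, if_false, aloop]
        rw [ih]; simp
      · simp only [List.foldl_cons, if_true, aloop]
        rw [ih]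
    · simp only [List.foldl_cons, if_neg hc, aloop]
      rw [ih]; simp

theorem aloop_eq_squeeze (l : List Char) :
    aloop false l = squeeze l ∧ ' ' :: aloop true l = squeeze (' ' :: l) := by
  induction l with
  | nil => simp [aloop, squeeze]
  | cons c r ih =>
    by_cases hc : c = ' '
    · subst hc
      constructor
      · simp only [aloop, if_true, Bool.false_eq_true, if_false]
        exact ih.2
      · simp only [aloop, if_true]
        rw [ih.2]
        simp [squeeze]
    · constructor
      · simp only [aloop, if_neg hc]
        rw [ih.1]
        match r with
        | [] => simp [squeeze]
        | d :: t => simp [squeeze, hc]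
      · simp only [aloop, if_neg hc]
        rw [ih.1]
        match r with
        | [] => simp [squeeze, hc]
        | d :: t => simp [squeeze, hc]

theorem mrep_head (d : Char) (r : List Char) : ∃ t, mrep (d :: r) = d :: t := by
  match r with
  | [] => exact ⟨[], rfl⟩
  | e :: s =>
    by_cases h : d = ' ' ∧ e = ' '
    · exact ⟨mrep s, by simp [mrep, h]⟩
    · exact ⟨mrep (e :: s), by simp [mrep, h]⟩

theorem squeeze_mrep (l : List Char) :
    squeeze (mrep l) = squeeze l ∧ squeeze (' ' :: mrep l) = squeeze (' ' :: l) := by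
  induction l using mrep.induct with
  | case1 => simp [mrep]
  | case2 c => simp [mrep]
  | case3 c d r hcd ih =>
    obtain ⟨hc, hd⟩ := hcd; subst hc; subst hd
    constructor
    · rw [show mrep (' ' :: ' ' :: r) = ' ' :: mrep r by simp [mrep]]
      rw [ih.2]
      simp [squeeze]
    · rw [show mrep (' ' :: ' ' :: r) = ' ' :: mrep r by simp [mrep]]
      rw [show squeeze (' ' :: ' ' :: mrep r) = squeeze (' ' :: mrep r) by simp [squeeze]]
      rw [ih.2]
      simp [squeeze]
  | case4 c d r hcd ih =>
    have hm : mrep (c :: d :: r) = c :: mrep (d :: r) := by simp [mrep, hcd]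
    obtain ⟨t, ht⟩ := mrep_head d r
    have g1 : squeeze (c :: mrep (d :: r)) = c :: squeeze (d :: r) := by
      rw [ht]
      rw [show squeeze (c :: d :: t) = c :: squeeze (d :: t) by simp [squeeze, hcd]]
      rw [← ht, ih.1]
    constructor
    · rw [hm, g1]
      simp [squeeze, hcd]
    · rw [hm]
      by_cases hc : c = ' '
      · subst hc
        have hd : ¬ d = ' ' := fun h => hcd ⟨rfl, h⟩
        rw [show squeeze (' ' :: ' ' :: mrep (d :: r)) = squeeze (' ' :: mrep (d :: r)) by
              simp [squeeze]]
        rw [ih.2]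
        simp [squeeze]
      · rw [show squeeze (' ' :: c :: mrep (d :: r)) = ' ' :: squeeze (c :: mrep (d :: r)) by
              simp [squeeze, hc]]
        rw [g1]
        rw [show squeeze (' ' :: c :: d :: r) = ' ' :: squeeze (c :: d :: r) by simp [squeeze, hc]]
        rw [show squeeze (c :: d :: r) = c :: squeeze (d :: r) by simp [squeeze, hcd]]

theorem squeeze_of_no_dd (l : List Char) (h : ¬ [' ', ' '] <:+: l) : squeeze l = l := by
  induction l using squeeze.induct with
  | case1 => rfl
  | case2 c => rfl
  | case3 c d r hcd ih =>
    obtain ⟨hc, hd⟩ := hcd; subst hc; subst hd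
    exact absurd ((List.infix_cons_iff).mpr (Or.inl (by simp [List.cons_prefix_cons]))) h
  | case4 c d r hcd ih =>
    have h' : ¬ [' ', ' '] <:+: d :: r := fun hi => h (hi.trans (List.suffix_cons c (d :: r)).isInfix)
    rw [show squeeze (c :: d :: r) = c :: squeeze (d :: r) by simp [squeeze, hcd]]
    rw [ih h']

theorem collapseFix_eq_squeeze (l : List Char) : collapseFix l = squeeze l := by
  induction l using collapseFix.induct with
  | case1 l h ih =>
    rw [collapseFix, dif_pos h, ih, replace_dd_eq_mrep]
    exact (squeeze_mrep l).1
  | case2 l h =>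
    rw [collapseFix, dif_neg h]
    exact (squeeze_of_no_dd l fun hi =>
      h ((PySem.Chars.isIn_iff_infix _ _).mpr hi)).symm

-- ===== VERDICT (by name: the statement is the Claim_ definition above) =====
theorem remove_extra_chars_spec : Claim_equal_remove_extra_chars := by
  intro text_data extra_chars _
  unfold Spec_remove_extra_chars remove_extra_chars remove_extra_chars_alt
  apply congrArg String.mk
  rw [foldl_eq_aloop, collapseFix_eq_squeeze]
  simpa using (aloop_eq_squeeze _).1
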